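-- pv_equiv track=rewrite | github.com/rrwt/daily-coding-challenge | daily_problems/problem_201_to_300/266.py | step_words
-- ===== SOURCE A (Python) =====
-- from collections import defaultdict
-- from typing import List
--
-- def can_convert(chars: dict, word: str) -> bool:
--     char_count = defaultdict(int)
--     miss = 0
--
--     for char in word:
--         if char in chars:
--             char_count[char] += 1
--         else:
--             miss += 1
--
--         if char_count[char] > chars[char]:
--             miss += 1
--
--     if miss > 1:
--         return False
--     return True
--
-- def step_words(words: List[str], input_word: str) -> List[str]:
--     size = len(input_word)
--     chars = defaultdict(int)
--     res = []
--
--     for char in input_word: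
--         chars[char] += 1
--
--     for word in words:
--         if len(word) == size + 1 and can_convert(chars, word):
--             res.append(word)
--
--     return res
-- ===== SOURCE B (Python) =====
-- from collections import Counter
-- from typing import List
--
-- def _covers(need: Counter, word: str) -> bool:
--     have = Counter(word)
--     return all(cnt <= have[c] for c, cnt in need.items())
--
-- def step_words(words: List[str], input_word: str) -> List[str]:
--     need = Counter(input_word)
--     target = len(input_word) + 1
--     return [w for w in words if len(w) == target and _covers(need, w)]
-- ===== Notes on version B (the rewrite author's own statement) =====
-- stated objective: simpler
-- what changed: Replaces the stateful miss-counting helper (two defaultdicts threaded through every word, counting missing/excess characters against a mutable dict) with one Counter of the input built once and a pure multiset-containment check per word; the len==size+1 guard makes 'miss<=1' equivalent to full coverage.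
import Mathlib
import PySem

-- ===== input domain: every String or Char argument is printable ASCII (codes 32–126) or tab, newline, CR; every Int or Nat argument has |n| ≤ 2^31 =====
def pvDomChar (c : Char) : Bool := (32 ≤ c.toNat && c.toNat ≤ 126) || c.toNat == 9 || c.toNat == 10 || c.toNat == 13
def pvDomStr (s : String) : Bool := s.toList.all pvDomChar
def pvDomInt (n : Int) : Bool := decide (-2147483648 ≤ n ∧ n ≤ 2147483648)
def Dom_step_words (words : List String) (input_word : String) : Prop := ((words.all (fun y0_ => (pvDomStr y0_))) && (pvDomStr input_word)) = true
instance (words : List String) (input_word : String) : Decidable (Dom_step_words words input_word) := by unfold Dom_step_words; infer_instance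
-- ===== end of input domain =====

-- B replaces A's stateful miss-counting helper (two defaultdicts, the `chars` dict threaded and
-- mutated across words) with one Counter of the input and a pure multiset-containment check: simpler.
-- A's `can_convert` mutates the shared `chars` dict (defaultdict reads insert zero-valued keys); the
-- equivalence proved here is about the return value (the zero insertions never change any lookup).

-- ===== PORT A =====
-- one iteration of can_convert's `for char in word` loop; state = (char_count, miss, chars);
-- defaultdict reads that may insert a zero are ported as `setdefault c 0` (exact Python semantics)
def canConvertStep (st : PySem.Dict Char Int × Int × PySem.Dict Char Int) (c : Char) :
    PySem.Dict Char Int × Int × PySem.Dict Char Int :=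
  match st.2.2.get? c with
  | some v =>                                     -- `char in chars`
      let cc := st.1.insert c (st.1.getD c 0 + 1) -- char_count[char] += 1
      (cc, (if cc.getD c 0 > v then st.2.1 + 1 else st.2.1), st.2.2)
  | none =>
      let miss := st.2.1 + 1                      -- miss += 1
      let cc := st.1.setdefault c 0               -- defaultdict read char_count[char]
      let ch := st.2.2.setdefault c 0             -- defaultdict read chars[char]
      (cc, (if cc.getD c 0 > ch.getD c 0 then miss + 1 else miss), ch)

-- can_convert(chars, word); returns the bool AND the (possibly mutated) chars dict
def canConvert (chars : PySem.Dict Char Int) (word : String) : Bool × PySem.Dict Char Int :=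
  let st := word.toList.foldl canConvertStep (PySem.Dict.empty, 0, chars)
  (if st.2.1 > 1 then false else true, st.2.2)

def step_words (words : List String) (input_word : String) : List String :=
  let size := input_word.toList.length
  let chars := input_word.toList.foldl (fun d c => d.insert c (d.getD c 0 + 1)) PySem.Dict.empty
  (words.foldl (fun (st : List String × PySem.Dict Char Int) w =>
      if w.toList.length = size + 1 then
        let r := canConvert st.2 w
        if r.1 then (st.1 ++ [w], r.2) else (st.1, r.2)
      else st) ([], chars)).1

-- ===== PORT B =====
-- _covers(need, word): every character of the input occurs in `word` at its required multiplicity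
def covers (need : PySem.Dict Char Int) (word : String) : Bool :=
  let haveC := PySem.Dict.counter word.toList
  need.items.all (fun p => p.2 ≤ haveC.getD p.1 0)

def step_words_alt (words : List String) (input_word : String) : List String :=
  let need := PySem.Dict.counter input_word.toList
  let target := input_word.toList.length + 1
  words.filter (fun w => w.toList.length == target && covers need w)

-- ===== PRECONDITION & SPEC =====
def Spec_step_words (words : List String) (input_word : String) (out : List String) : Prop := out = step_words_alt words input_word
instance (words : List String) (input_word : String) (out : List String) : Decidable (Spec_step_words words input_word out) := by unfold Spec_step_words; infer_instance

-- ===== CLAIM (what is proved, stated in full; the proofs are below) =====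
def Claim_equal_step_words : Prop := ∀ (words : List String) (input_word : String), Dom_step_words words input_word → Spec_step_words words input_word (step_words words input_word)

-- ===== LEMMAS AND PROOFS =====

-- model of can_convert's miss counter: processing char c adds 1 exactly when the running
-- occurrence count f c passes the budget ic c
def mrest (ic f : Char → Int) : List Char → Int
  | [] => 0
  | c :: r => (if f c + 1 > ic c then 1 else 0) + mrest ic (fun d => if d = c then f c + 1 else f d) r

theorem dict_getD_get? (d : PySem.Dict Char Int) (k : Char) (v : Int) :
    d.getD k v = (d.get? k).getD v := rfl

-- the can_convert loop computes miss + mrest, and every lookup in the chars dict is unchanged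
theorem canConvert_loop (ic : Char → Int) (hic : ∀ c, 0 ≤ ic c) :
    ∀ (rest : List Char) (cc ch : PySem.Dict Char Int) (miss : Int) (f : Char → Int),
    (∀ c, ch.getD c 0 = ic c) →
    (∀ c, 0 < ic c → cc.getD c 0 = f c) →
    (∀ c, 0 ≤ f c) →
    (∀ c, 0 ≤ cc.getD c 0) →
    (∀ c, ch.get? c = none → cc.getD c 0 = 0) →
    (rest.foldl canConvertStep (cc, miss, ch)).2.1 = miss + mrest ic f rest ∧
    (∀ c, (rest.foldl canConvertStep (cc, miss, ch)).2.2.getD c 0 = ic c) := by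
  intro rest
  induction rest with
  | nil =>
    intro cc ch miss f hch _ _ _ _
    exact ⟨by simp [mrest], hch⟩
  | cons c rest ih =>
    intro cc ch miss f hch hcf hf hcc hnone
    rw [List.foldl_cons]
    cases hg : ch.get? c with
    | some v =>
      have hv : v = ic c := by
        have h := hch c
        rw [dict_getD_get?, hg] at h
        simpa using h
      have hstep : canConvertStep (cc, miss, ch) c =
          (cc.insert c (cc.getD c 0 + 1),
           (if (cc.insert c (cc.getD c 0 + 1)).getD c 0 > v then miss + 1 else miss), ch) := by
        simp [canConvertStep, hg]
      have hins : (cc.insert c (cc.getD c 0 + 1)).getD c 0 = cc.getD c 0 + 1 :=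
        PySem.Dict.getD_insert_self _ _ _ _
      have hcf' : ∀ d, 0 < ic d →
          (cc.insert c (cc.getD c 0 + 1)).getD d 0 = (if d = c then f c + 1 else f d) := by
        intro d hd
        rw [PySem.Dict.getD_insert]
        by_cases hdc : d = c
        · subst hdc; rw [if_pos rfl, if_pos rfl, hcf d hd]
        · rw [if_neg hdc, if_neg hdc]; exact hcf d hd
      have hf' : ∀ d, 0 ≤ (if d = c then f c + 1 else f d) := by
        intro d; split_ifs
        · have := hf c; omega
        · exact hf d
      have hcc' : ∀ d, 0 ≤ (cc.insert c (cc.getD c 0 + 1)).getD d 0 := by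
        intro d; rw [PySem.Dict.getD_insert]; split_ifs
        · have := hcc c; omega
        · exact hcc d
      have hnone' : ∀ d, ch.get? d = none → (cc.insert c (cc.getD c 0 + 1)).getD d 0 = 0 := by
        intro d hd
        have hdc : d ≠ c := fun hh => by rw [hh, hg] at hd; cases hd
        rw [PySem.Dict.getD_insert, if_neg hdc]; exact hnone d hd
      obtain ⟨hm, hinv⟩ := ih (cc.insert c (cc.getD c 0 + 1)) ch
        (if (cc.insert c (cc.getD c 0 + 1)).getD c 0 > v then miss + 1 else miss)
        (fun d => if d = c then f c + 1 else f d) hch hcf' hf' hcc' hnone'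
      rw [hstep]
      refine ⟨?_, hinv⟩
      rw [hm, mrest, hins, hv]
      by_cases h0 : 0 < ic c
      · rw [hcf c h0]
        split_ifs <;> omega
      · have h00 : ic c = 0 := by have := hic c; omega
        have h1 := hcc c
        have h2 := hf c
        rw [h00]
        split_ifs <;> omega
    | none =>
      have hic0 : ic c = 0 := by
        have h := hch c
        rw [dict_getD_get?, hg] at h
        simpa using h.symm
      have hcc0 : cc.getD c 0 = 0 := hnone c hg
      have hccsd : (cc.setdefault c 0).getD c 0 = 0 := by
        rw [PySem.Dict.getD_setdefault_self, hcc0]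
      have hchsd : (ch.setdefault c 0).getD c 0 = 0 := by
        rw [PySem.Dict.getD_setdefault_self]
        have h := hch c
        rw [h, hic0]
      have hstep : canConvertStep (cc, miss, ch) c =
          (cc.setdefault c 0, miss + 1, ch.setdefault c 0) := by
        simp [canConvertStep, hg, hccsd, hchsd]
      have hch' : ∀ d, (ch.setdefault c 0).getD d 0 = ic d := by
        intro d
        by_cases hdc : d = c
        · subst hdc; rw [hchsd, hic0]
        · rw [dict_getD_get?, PySem.Dict.get?_setdefault_of_ne _ _ hdc, ← dict_getD_get?]
          exact hch d
      have hcf' : ∀ d, 0 < ic d → (cc.setdefault c 0).getD d 0 = (if d = c then f c + 1 else f d) := by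
        intro d hd
        have hdc : d ≠ c := fun hh => by rw [hh, hic0] at hd; omega
        rw [dict_getD_get?, PySem.Dict.get?_setdefault_of_ne _ _ hdc, ← dict_getD_get?, if_neg hdc]
        exact hcf d hd
      have hf' : ∀ d, 0 ≤ (if d = c then f c + 1 else f d) := by
        intro d; split_ifs
        · have := hf c; omega
        · exact hf d
      have hcc' : ∀ d, 0 ≤ (cc.setdefault c 0).getD d 0 := by
        intro d
        by_cases hdc : d = c
        · subst hdc; rw [hccsd]
        · rw [dict_getD_get?, PySem.Dict.get?_setdefault_of_ne _ _ hdc, ← dict_getD_get?]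
          exact hcc d
      have hnone' : ∀ d, (ch.setdefault c 0).get? d = none → (cc.setdefault c 0).getD d 0 = 0 := by
        intro d hd
        have hdc : d ≠ c := fun hh => by
          rw [hh, PySem.Dict.get?_setdefault_self] at hd; cases hd
        rw [PySem.Dict.get?_setdefault_of_ne _ _ hdc] at hd
        rw [dict_getD_get?, PySem.Dict.get?_setdefault_of_ne _ _ hdc, ← dict_getD_get?]
        exact hnone d hd
      obtain ⟨hm, hinv⟩ := ih (cc.setdefault c 0) (ch.setdefault c 0) (miss + 1)
        (fun d => if d = c then f c + 1 else f d) hch' hcf' hf' hcc' hnone'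
      rw [hstep]
      refine ⟨?_, hinv⟩
      rw [hm, mrest, hic0]
      have := hf c
      rw [if_pos (by omega)]
      ring

-- closed form of mrest as a sum over any finite superset of the traversed characters
theorem mrest_sum (ic : Char → Int) (l : List Char) :
    ∀ (f : Char → Int) (S : Finset Char), (∀ c ∈ l, c ∈ S) →
    mrest ic f l = ∑ c ∈ S, ((l.count c : Int) - min (f c + l.count c) (ic c) + min (f c) (ic c)) := by
  induction l with
  | nil =>
    intro f S _
    rw [mrest]
    exact (Finset.sum_eq_zero (fun d _ => by simp)).symm
  | cons c r ih =>
    intro f S h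
    have hc : c ∈ S := h c List.mem_cons_self
    rw [mrest, ih _ S (fun d hd => h d (List.mem_cons_of_mem _ hd))]
    have herase : ∑ d ∈ S.erase c, ((r.count d : Int) - min ((if d = c then f c + 1 else f d) + r.count d) (ic d) + min (if d = c then f c + 1 else f d) (ic d))
        = ∑ d ∈ S.erase c, (((c :: r).count d : Int) - min (f d + (c :: r).count d) (ic d) + min (f d) (ic d)) := by
      refine Finset.sum_congr rfl (fun d hd => ?_)
      have hdc : d ≠ c := Finset.ne_of_mem_erase hd
      have hcnt : (c :: r).count d = r.count d := by
        rw [List.count_cons]; simp [Ne.symm hdc]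
      rw [hcnt]
      simp only [if_neg hdc]
    rw [← Finset.add_sum_erase S _ hc, ← Finset.add_sum_erase S _ hc, herase]
    have hcnt : (c :: r).count c = r.count c + 1 := List.count_cons_self
    have hself : (if c = c then f c + 1 else f c) = f c + 1 := if_pos rfl
    rw [hcnt, hself]
    push_cast
    split_ifs with h1 <;> omega

-- sum of character counts over a superset of the characters = length
theorem sum_count_superset (l : List Char) (S : Finset Char) (h : ∀ c ∈ l, c ∈ S) :
    (∑ c ∈ S, (l.count c : Int)) = l.length := by
  have hsub : l.toFinset ⊆ S := fun c hc => h c (List.mem_toFinset.mp hc)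
  rw [← Finset.sum_subset hsub (fun c _ hc => by
    rw [List.count_eq_zero_of_not_mem (fun hm => hc (List.mem_toFinset.mpr hm))]; rfl)]
  rw [← Nat.cast_sum]
  exact_mod_cast congrArg (Nat.cast : Nat → Int) (List.sum_toFinset_count_eq_length l)

-- the decision: for a word one char longer than the input, miss ≤ 1 ⟺ full coverage
theorem miss_le_one_iff (input w : List Char) (hlen : w.length = input.length + 1) :
    mrest (fun c => (input.count c : Int)) (fun _ => 0) w ≤ 1 ↔
    (∀ c, (input.count c : Int) ≤ (w.count c : Int)) := by
  have hS : ∀ c ∈ w, c ∈ (w.toFinset ∪ input.toFinset) := fun c hc => Finset.mem_union_left _ (List.mem_toFinset.mpr hc)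
  rw [mrest_sum _ w _ (w.toFinset ∪ input.toFinset) hS]
  have hterm : ∀ c ∈ (w.toFinset ∪ input.toFinset),
      ((w.count c : Int) - min ((fun _ => (0:Int)) c + (w.count c : Int)) ((input.count c : Int)) + min ((fun _ => (0:Int)) c) ((input.count c : Int)))
      = (w.count c : Int) - min (w.count c : Int) (input.count c : Int) := by
    intro c _
    rw [zero_add, min_eq_left (by positivity : (0:Int) ≤ (input.count c : Int)), add_zero]
  rw [Finset.sum_congr rfl hterm, Finset.sum_sub_distrib,
    sum_count_superset w _ hS,
    ]
  have h2 : (∑ c ∈ (w.toFinset ∪ input.toFinset), (input.count c : Int)) = input.length :=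
    sum_count_superset input _ (fun c hc => Finset.mem_union_right _ (List.mem_toFinset.mpr hc))
  have hmin_le : ∀ c ∈ (w.toFinset ∪ input.toFinset), min (w.count c : Int) (input.count c : Int) ≤ (input.count c : Int) :=
    fun c _ => min_le_right _ _
  constructor
  · intro hle c
    by_cases hcS : c ∈ (w.toFinset ∪ input.toFinset)
    · have hsum_le : (∑ c ∈ (w.toFinset ∪ input.toFinset), min (w.count c : Int) (input.count c : Int)) ≤ ∑ c ∈ (w.toFinset ∪ input.toFinset), (input.count c : Int) :=
        Finset.sum_le_sum hmin_le
      have heq : (∑ c ∈ (w.toFinset ∪ input.toFinset), min (w.count c : Int) (input.count c : Int)) = ∑ c ∈ (w.toFinset ∪ input.toFinset), (input.count c : Int) := by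
        rw [h2] at hsum_le ⊢
        rw [hlen] at hle
        push_cast at hle
        omega
      have hall := (Finset.sum_eq_sum_iff_of_le hmin_le).mp heq c hcS
      exact min_eq_right_iff.mp hall
    · have : c ∉ input := fun hm => hcS (Finset.mem_union_right _ (List.mem_toFinset.mpr hm))
      rw [List.count_eq_zero_of_not_mem this]
      positivity
  · intro hcov
    rw [Finset.sum_congr rfl (fun c _ => min_eq_right (hcov c)), h2, hlen]
    push_cast
    omega

-- B's per-word test, characterised
theorem covers_iff (input : List Char) (w : String) :
    covers (PySem.Dict.counter input) w = decide (∀ c, (input.count c : Int) ≤ (w.toList.count c : Int)) := by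
  unfold covers
  rw [Bool.eq_iff_iff, PySem.Dict.items_counter]
  simp only [List.all_map, List.all_eq_true, PySem.Dict.getD_counter, decide_eq_true_eq,
    PySem.Set.mem_ofList, Function.comp]
  constructor
  · intro h c
    by_cases hc : c ∈ input
    · exact h c hc
    · rw [List.count_eq_zero_of_not_mem hc]
      exact_mod_cast Int.natCast_nonneg _
  · intro h c _
    exact h c

-- A's per-word call, characterised (under the chars-dict invariant), plus preservation
theorem canConvert_spec (input : List Char) (ch : PySem.Dict Char Int)
    (hch : ∀ c, ch.getD c 0 = (input.count c : Int)) (w : String)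
    (hlen : w.toList.length = input.length + 1) :
    (canConvert ch w).1 = covers (PySem.Dict.counter input) w ∧
    (∀ c, (canConvert ch w).2.getD c 0 = (input.count c : Int)) := by
  obtain ⟨hm, hinv⟩ := canConvert_loop (fun c => (input.count c : Int))
    (fun c => by positivity) w.toList PySem.Dict.empty ch 0 (fun _ => 0)
    hch (fun c _ => by rw [PySem.Dict.getD_empty]) (fun _ => le_refl 0)
    (fun c => by rw [PySem.Dict.getD_empty]) (fun c _ => PySem.Dict.getD_empty c 0)
  unfold canConvert
  refine ⟨?_, hinv⟩
  rw [covers_iff]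
  show (if (List.foldl canConvertStep (PySem.Dict.empty, 0, ch) w.toList).2.1 > 1 then false else true) = _
  rw [hm, Bool.eq_iff_iff]
  have hiff := miss_le_one_iff input w.toList hlen
  split_ifs with hgt
  · simp only [false_iff, decide_eq_true_eq]
    intro hall
    have := hiff.mpr hall
    omega
  · simp only [true_iff, decide_eq_true_eq]
    exact hiff.mp (by omega)

-- the outer loop over `words`
theorem outer_loop (input : List Char) :
    ∀ (ws : List String) (ch : PySem.Dict Char Int) (acc : List String),
    (∀ c, ch.getD c 0 = (input.count c : Int)) →
    (ws.foldl (fun (st : List String × PySem.Dict Char Int) w =>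
      if w.toList.length = input.length + 1 then
        let r := canConvert st.2 w
        if r.1 then (st.1 ++ [w], r.2) else (st.1, r.2)
      else st) (acc, ch)).1
    = acc ++ ws.filter (fun w => w.toList.length == input.length + 1 && covers (PySem.Dict.counter input) w) := by
  intro ws
  induction ws with
  | nil => intro ch acc _; simp
  | cons w ws ih =>
    intro ch acc hch
    rw [List.foldl_cons, List.filter_cons]
    by_cases hl : w.toList.length = input.length + 1
    · obtain ⟨hb, hinv⟩ := canConvert_spec input ch hch w hl
      rw [if_pos hl]
      show (List.foldl _ (if (canConvert ch w).1 = true then (acc ++ [w], (canConvert ch w).2) else (acc, (canConvert ch w).2)) ws).1 = _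
      cases hcov : covers (PySem.Dict.counter input) w with
      | true =>
        rw [hb, hcov, if_pos rfl, ih _ _ hinv]
        simp [hl]
      | false =>
        rw [hb, hcov, if_neg (by simp), ih _ _ hinv]
        simp [hl]
    · rw [if_neg hl, ih _ _ hch]
      have hbeq : (w.toList.length == input.length + 1) = false := by simpa using hl
      simp only [hbeq, Bool.false_and, Bool.false_eq_true, if_false]

-- ===== VERDICT (by name: the statement is the Claim_ definition above) =====
theorem step_words_spec : Claim_equal_step_words := by
  intro words input_word _
  unfold Spec_step_words step_words step_words_alt
  rw [PySem.Dict.foldl_insert_getD_add_one_eq_counter]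
  rw [outer_loop input_word.toList words _ [] (fun c => PySem.Dict.getD_counter _ c)]
  simp
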